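-- pv_equiv track=rewrite | github.com/tzy181956/SC-Training-System-git | backend/app/schemas/assignment.py | _normalize_repeat_weekdays
-- ===== SOURCE A (Python) =====
-- DEFAULT_REPEAT_WEEKDAYS = [1, 2, 3, 4, 5, 6, 7]
--
-- def _normalize_repeat_weekdays(value: object) -> list[int]:
--     if value is None:
--         return DEFAULT_REPEAT_WEEKDAYS.copy()
--     if not isinstance(value, (list, tuple, set)):
--         raise ValueError("循环星期格式不正确")
--
--     normalized: list[int] = list()
--     seen: set[int] = set()
--     for raw in value:
--         try:
--             weekday = int(raw)
--         except (TypeError, ValueError) as exc: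
--             raise ValueError("循环星期只能使用 1-7") from exc
--         if weekday < 1 or weekday > 7:
--             raise ValueError("循环星期只能使用 1-7")
--         if weekday not in seen:
--             normalized.append(weekday)
--             seen.add(weekday)
--
--     if not normalized:
--         raise ValueError("至少选择一个循环星期")
--     return sorted(normalized)
-- ===== SOURCE B (Python) =====
-- DEFAULT_REPEAT_WEEKDAYS = [1, 2, 3, 4, 5, 6, 7]
--
-- def _normalize_repeat_weekdays(value: object) -> list[int]:
--     if value is None:
--         return DEFAULT_REPEAT_WEEKDAYS.copy()
--     if not isinstance(value, (list, tuple, set)):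
--         raise ValueError("循环星期格式不正确")
--
--     mask = 0
--     for raw in value:
--         try:
--             weekday = int(raw)
--         except (TypeError, ValueError) as exc:
--             raise ValueError("循环星期只能使用 1-7") from exc
--         if weekday < 1 or weekday > 7:
--             raise ValueError("循环星期只能使用 1-7")
--         mask |= 1 << (weekday - 1)
--
--     if mask == 0:
--         raise ValueError("至少选择一个循环星期")
--     return [d for d in range(1, 8) if mask >> (d - 1) & 1]
-- ===== Notes on version B (the rewrite author's own statement) =====
-- stated objective: alternative
-- what changed: Replaces A's parallel ordered-dedup list + seen-set + comparison sort with a single integer bitmask (OR-accumulated 7-bit set) from which the sorted result is read off bit by bit; no set, no list accumulator, no sort.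
import Mathlib
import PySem

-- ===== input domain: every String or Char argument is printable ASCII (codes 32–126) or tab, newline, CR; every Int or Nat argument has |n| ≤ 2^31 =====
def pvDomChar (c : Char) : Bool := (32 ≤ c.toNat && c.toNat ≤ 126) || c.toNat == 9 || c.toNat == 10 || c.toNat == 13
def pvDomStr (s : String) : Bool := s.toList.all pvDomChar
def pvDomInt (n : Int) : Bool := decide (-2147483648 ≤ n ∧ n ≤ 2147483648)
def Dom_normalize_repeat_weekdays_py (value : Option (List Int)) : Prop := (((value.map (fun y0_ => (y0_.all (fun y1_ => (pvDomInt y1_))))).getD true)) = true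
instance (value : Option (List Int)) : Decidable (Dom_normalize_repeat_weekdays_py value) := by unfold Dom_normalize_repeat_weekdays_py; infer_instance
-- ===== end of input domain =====

-- B replaces A's ordered-dedup list + seen-set + comparison sort with a single integer
-- bitmask accumulated by OR, from which the already-sorted result is read off bit by bit
-- (objective: alternative). Equivalence is on return values; raising paths are excluded by Pre_.

-- ===== PORT A =====
-- A's validation loop: none models a raise (out-of-range element, or empty selection at the end).
def pvGoA : List Int → List Int → PySem.Set Int → Option (List Int)
  | [], normalized, _ =>
      if normalized = [] then none
      else some (PySem.List.sorted normalized (fun x => x) false)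
  | raw :: rest, normalized, seen =>
      if raw < 1 ∨ raw > 7 then none
      else if PySem.Set.contains seen raw then pvGoA rest normalized seen
      else pvGoA rest (normalized ++ [raw]) (PySem.Set.add seen raw)

def normalize_repeat_weekdays_py (value : Option (List Int)) : List Int :=
  match value with
  | none => [1, 2, 3, 4, 5, 6, 7]
  | some xs => (pvGoA xs [] PySem.Set.empty).getD []

-- ===== PORT B =====
-- B's loop: mask |= 1 << (weekday - 1); the mask is a nonnegative Python int, ported as Nat
-- (exact: weekday is validated to 1..7 before the shift, so weekday - 1 ≥ 0). none models a raise.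
def pvGoB : List Int → Nat → Option Nat
  | [], mask => if mask = 0 then none else some mask
  | raw :: rest, mask =>
      if raw < 1 ∨ raw > 7 then none
      else pvGoB rest (mask ||| (1 <<< (raw - 1).toNat))

-- `mask >> (d - 1) & 1` is nonzero exactly when bit (d-1) is set: Nat.testBit, exact on Nat.
def normalize_repeat_weekdays_py_alt (value : Option (List Int)) : List Int :=
  match value with
  | none => [1, 2, 3, 4, 5, 6, 7]
  | some xs =>
      match pvGoB xs 0 with
      | none => []
      | some mask => (PySem.List.pyRange 1 8 1).filter (fun d => Nat.testBit mask (d - 1).toNat)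

-- ===== PRECONDITION & SPEC =====
-- Pre_ excludes exactly the inputs where A raises ValueError: a list containing an element
-- outside 1..7, or the empty list (value.getD [] is [] for None, so None is admitted).
def Pre_normalize_repeat_weekdays_py (value : Option (List Int)) : Prop :=
  value ≠ some [] ∧ ∀ x ∈ value.getD [], 1 ≤ x ∧ x ≤ 7
instance (value : Option (List Int)) : Decidable (Pre_normalize_repeat_weekdays_py value) := by
  unfold Pre_normalize_repeat_weekdays_py; infer_instance

def pvWitness_normalize_repeat_weekdays_py : Option (List Int) := some [3, 1, 3, 7]

def Spec_normalize_repeat_weekdays_py (value : Option (List Int)) (out : List Int) : Prop := out = normalize_repeat_weekdays_py_alt value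
instance (value : Option (List Int)) (out : List Int) : Decidable (Spec_normalize_repeat_weekdays_py value out) := by unfold Spec_normalize_repeat_weekdays_py; infer_instance

-- ===== CLAIM (what is proved, stated in full; the proofs are below) =====
def Claim_equal_normalize_repeat_weekdays_py : Prop := ∀ (value : Option (List Int)), Dom_normalize_repeat_weekdays_py value → Pre_normalize_repeat_weekdays_py value → Spec_normalize_repeat_weekdays_py value (normalize_repeat_weekdays_py value)

-- ===== LEMMAS AND PROOFS =====

def pvMaskOf (xs : List Int) : Nat :=
  xs.foldl (fun m x => m ||| (1 <<< (x - 1).toNat)) 0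

-- A's loop keeps `normalized` and `seen` equal as lists; it computes the left fold of Set.add.
theorem pvGoA_eq (xs : List Int) (acc : List Int)
    (h : ∀ x ∈ xs, 1 ≤ x ∧ x ≤ 7) :
    pvGoA xs acc acc =
      (if xs.foldl PySem.Set.add acc = [] then none
       else some (PySem.List.sorted (xs.foldl PySem.Set.add acc) (fun x => x) false)) := by
  induction xs generalizing acc with
  | nil => simp [pvGoA]
  | cons raw rest ih =>
      have hr := h raw (List.mem_cons_self)
      have hrest : ∀ x ∈ rest, 1 ≤ x ∧ x ≤ 7 := fun x hx => h x (List.mem_cons_of_mem _ hx)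
      simp only [pvGoA, List.foldl_cons]
      rw [if_neg (by omega)]
      by_cases hc : PySem.Set.contains acc raw = true
      · have : PySem.Set.add acc raw = acc :=
          PySem.Set.add_of_mem ((PySem.Set.contains_iff _ _).mp hc)
        rw [if_pos hc, this, ih acc hrest]
      · have hnm : raw ∉ acc := fun hm => hc ((PySem.Set.contains_iff _ _).mpr hm)
        have : PySem.Set.add acc raw = acc ++ [raw] := PySem.Set.add_of_not_mem hnm
        rw [if_neg hc, this, ih (acc ++ [raw]) hrest]

-- B's loop never hits the raise branch under Pre_ and computes the fold of the OR step.
theorem pvGoB_eq (xs : List Int) (mask : Nat)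
    (h : ∀ x ∈ xs, 1 ≤ x ∧ x ≤ 7) :
    pvGoB xs mask =
      (if xs.foldl (fun m x => m ||| (1 <<< (x - 1).toNat)) mask = 0 then none
       else some (xs.foldl (fun m x => m ||| (1 <<< (x - 1).toNat)) mask)) := by
  induction xs generalizing mask with
  | nil => simp [pvGoB]
  | cons raw rest ih =>
      have hr := h raw (List.mem_cons_self)
      simp only [pvGoB, List.foldl_cons]
      rw [if_neg (by omega)]
      exact ih _ (fun x hx => h x (List.mem_cons_of_mem _ hx))

-- A bit of the fold is set iff some element of the list (shifted by the start mask) set it.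
theorem pvTestBit_fold (xs : List Int) (mask : Nat) (k : Nat) :
    (xs.foldl (fun m x => m ||| (1 <<< (x - 1).toNat)) mask).testBit k
      = (mask.testBit k || xs.any (fun x => (x - 1).toNat = k)) := by
  induction xs generalizing mask with
  | nil => simp
  | cons raw rest ih =>
      simp only [List.foldl_cons, ih, List.any_cons]
      simp only [Nat.testBit_or, Nat.shiftLeft_eq, Nat.one_mul, Nat.testBit_two_pow]
      by_cases hk : (raw - 1).toNat = k
      · simp [hk]
      · simp [Bool.or_assoc]

-- Membership in the mask is membership in the list, for d and the elements both in 1..7.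
theorem pvTestBit_mem (xs : List Int) (d : Int)
    (h : ∀ x ∈ xs, 1 ≤ x ∧ x ≤ 7) (hd1 : 1 ≤ d) (hd7 : d ≤ 7) :
    (pvMaskOf xs).testBit (d - 1).toNat = true ↔ d ∈ xs := by
  unfold pvMaskOf
  rw [pvTestBit_fold]
  simp only [Nat.zero_testBit, Bool.false_or, List.any_eq_true, decide_eq_true_eq]
  constructor
  · rintro ⟨x, hx, he⟩
    have hb := h x hx
    have : x = d := by omega
    exact this ▸ hx
  · intro hm; exact ⟨d, hm, rfl⟩

-- The mask of a nonempty valid list is nonzero.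
theorem pvMaskOf_ne_zero (xs : List Int) (hxs : xs ≠ [])
    (h : ∀ x ∈ xs, 1 ≤ x ∧ x ≤ 7) : pvMaskOf xs ≠ 0 := by
  obtain ⟨y, hy⟩ := List.exists_mem_of_ne_nil xs hxs
  intro h0
  have hb := h y hy
  have := (pvTestBit_mem xs y h hb.1 hb.2).mpr hy
  rw [h0] at this
  simp at this

-- The core fact: sorting the distinct elements equals scanning 1..7 by bitmask membership.
theorem pvSorted_eq_filter (xs : List Int) (h : ∀ x ∈ xs, 1 ≤ x ∧ x ≤ 7) :
    PySem.List.sorted (PySem.Set.ofList xs) (fun x => x) false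
      = (PySem.List.pyRange 1 8 1).filter (fun d => Nat.testBit (pvMaskOf xs) (d - 1).toNat) := by
  apply PySem.List.sorted_eq_of_perm_of_pairwise_lt
  · rw [List.perm_ext_iff_of_nodup
      (List.Nodup.filter _ (PySem.List.nodup_pyRange_one 1 8)) (PySem.Set.nodup_ofList xs)]
    intro a
    simp only [List.mem_filter, PySem.List.mem_pyRange_one, PySem.Set.mem_ofList]
    constructor
    · rintro ⟨hr, hm⟩
      exact (pvTestBit_mem xs a h (by omega) (by omega)).mp hm
    · intro hm
      have hb := h a hm
      exact ⟨⟨hb.1, by omega⟩, (pvTestBit_mem xs a h hb.1 hb.2).mpr hm⟩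
  · exact List.Pairwise.filter _ (PySem.List.pairwise_lt_pyRange_one 1 8)

-- ===== VERDICT (by name: the statement is the Claim_ definition above) =====
theorem normalize_repeat_weekdays_py_spec : Claim_equal_normalize_repeat_weekdays_py := by
  intro value _ hpre
  obtain ⟨hne, hrange⟩ := hpre
  unfold Spec_normalize_repeat_weekdays_py
  match value with
  | none => rfl
  | some xs =>
      have hrange' : ∀ x ∈ xs, 1 ≤ x ∧ x ≤ 7 := by simpa using hrange
      have hxs : xs ≠ [] := fun hnil => hne (by rw [hnil])
      have hofA : xs.foldl PySem.Set.add PySem.Set.empty = PySem.Set.ofList xs := by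
        rw [PySem.Set.ofList_eq_foldl]; rfl
      have hofne : PySem.Set.ofList xs ≠ [] := by
        obtain ⟨y, hy⟩ := List.exists_mem_of_ne_nil xs hxs
        intro hnil
        have : y ∈ PySem.Set.ofList xs := (PySem.Set.mem_ofList xs y).mpr hy
        rw [hnil] at this; exact (List.not_mem_nil) this
      have hmne : pvMaskOf xs ≠ 0 := pvMaskOf_ne_zero xs hxs hrange'
      simp only [normalize_repeat_weekdays_py, normalize_repeat_weekdays_py_alt]
      rw [show (PySem.Set.empty : PySem.Set Int) = [] from rfl] at hofA
      rw [show (PySem.Set.empty : PySem.Set Int) = [] from rfl]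
      rw [pvGoA_eq xs [] hrange', pvGoB_eq xs 0 hrange']
      rw [hofA, if_neg hofne]
      rw [show xs.foldl (fun m x => m ||| (1 <<< (x - 1).toNat)) 0 = pvMaskOf xs from rfl,
        if_neg hmne]
      simp only [Option.getD_some]
      exact pvSorted_eq_filter xs hrange'
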